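-- pv_equiv track=rewrite | github.com/TNThomas/nav-subsystem-repair-kit | scoring.py | score_incomplete_chars
-- ===== SOURCE A (Python) =====
-- def score_incomplete_chars(chars: str) -> int:
--     result = 0
--     for char in chars[::-1]:
--         result *= 5
--         if char == '(':
--             result += 1
--         elif char == '[':
--             result += 2
--         elif char == '{':
--             result += 3
--         elif char == '<':
--             result += 4
--     return result
-- ===== SOURCE B (Python) =====
-- _BRACKET_VALUE = {'(': 1, '[': 2, '{': 3, '<': 4}
--
-- def score_incomplete_chars(chars: str) -> int:
--     return sum(_BRACKET_VALUE[c] * 5**i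
--                for i, c in enumerate(chars) if c in _BRACKET_VALUE)
-- ===== Notes on version B (the rewrite author's own statement) =====
-- stated objective: alternative
-- what changed: Computes each bracket's contribution independently as digit * 5**position over the FORWARD string (enumerate + filter to bracket characters + sum), instead of A's reversed-string Horner loop that multiplies a running accumulator by 5 at every character; there is no reversal and no accumulator.
import Mathlib
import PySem

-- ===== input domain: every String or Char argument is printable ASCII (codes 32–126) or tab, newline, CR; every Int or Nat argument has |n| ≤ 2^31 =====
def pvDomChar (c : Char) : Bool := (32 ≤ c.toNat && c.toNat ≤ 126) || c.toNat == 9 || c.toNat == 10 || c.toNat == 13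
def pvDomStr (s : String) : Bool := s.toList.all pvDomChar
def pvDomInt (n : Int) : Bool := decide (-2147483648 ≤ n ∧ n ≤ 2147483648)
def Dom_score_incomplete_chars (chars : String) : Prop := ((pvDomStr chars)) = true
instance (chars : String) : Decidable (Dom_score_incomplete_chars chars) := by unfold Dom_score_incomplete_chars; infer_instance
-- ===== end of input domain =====

-- B sums each bracket's independent contribution digit * 5^position over the forward string (enumerate + filter + sum), instead of A's reversed-string Horner accumulator loop (alternative decomposition, same result).

-- ===== PORT A =====
-- result *= 5; then the if/elif chain adds the bracket's digit
def pvStepA (result : Int) (char : Char) : Int :=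
  let result := result * 5
  if char = '(' then result + 1
  else if char = '[' then result + 2
  else if char = '{' then result + 3
  else if char = '<' then result + 4
  else result

def score_incomplete_chars (chars : String) : Int :=
  -- for char in chars[::-1]: …   (chars[::-1] = the reversed character list)
  (chars.toList.reverse).foldl pvStepA 0

-- ===== PORT B =====
-- _BRACKET_VALUE = {'(': 1, '[': 2, '{': 3, '<': 4}
def pvBracketValue : PySem.Dict Char Int :=
  PySem.Dict.ofList [('(', 1), ('[', 2), ('{', 3), ('<', 4)]

def score_incomplete_chars_alt (chars : String) : Int :=
  -- sum(_BRACKET_VALUE[c] * 5**i for i, c in enumerate(chars) if c in _BRACKET_VALUE)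
  -- (_BRACKET_VALUE[c] under the 'c in _BRACKET_VALUE' filter is ported as getD, exact there)
  (((PySem.List.enumerate chars.toList).filter
      (fun p => PySem.Dict.contains pvBracketValue p.2)).map
    (fun p => PySem.Dict.getD pvBracketValue p.2 0 * 5 ^ p.1.toNat)).sum

-- ===== PRECONDITION & SPEC =====
def Spec_score_incomplete_chars (chars : String) (out : Int) : Prop := out = score_incomplete_chars_alt chars
instance (chars : String) (out : Int) : Decidable (Spec_score_incomplete_chars chars out) := by unfold Spec_score_incomplete_chars; infer_instance

-- ===== CLAIM (what is proved, stated in full; the proofs are below) =====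
def Claim_equal_score_incomplete_chars : Prop := ∀ (chars : String), Dom_score_incomplete_chars chars → Spec_score_incomplete_chars chars (score_incomplete_chars chars)

-- ===== LEMMAS AND PROOFS =====

-- the per-character digit, as B reads it
def pvVal (c : Char) : Int := PySem.Dict.getD pvBracketValue c 0

theorem pvVal_eq (c : Char) :
    pvVal c = (if c = '(' then 1 else if c = '[' then 2
               else if c = '{' then 3 else if c = '<' then 4 else 0) := by
  have hd : pvBracketValue = ⟨[('(',1),('[',2),('{',3),('<',4)]⟩ := by decide
  simp only [pvVal, hd, PySem.Dict.getD, PySem.Dict.get?]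
  split_ifs with h1 h2 h3 h4 <;> try (subst_vars; decide)
  have e1 : ('(' == c) = false := by simpa using (Ne.symm h1)
  have e2 : ('[' == c) = false := by simpa using (Ne.symm h2)
  have e3 : ('{' == c) = false := by simpa using (Ne.symm h3)
  have e4 : ('<' == c) = false := by simpa using (Ne.symm h4)
  simp [List.find?, e1, e2, e3, e4]

theorem pvStepA_eq (r : Int) (c : Char) : pvStepA r c = r * 5 + pvVal c := by
  simp only [pvStepA, pvVal_eq]
  split_ifs <;> ring

theorem hornerA_cons (c : Char) (l : List Char) :
    ((c :: l).reverse).foldl pvStepA 0 = (l.reverse).foldl pvStepA 0 * 5 + pvVal c := by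
  simp [List.foldl_append, pvStepA_eq]

-- a character the dict does not contain contributes 0
theorem pvVal_of_not_contains (c : Char) (h : PySem.Dict.contains pvBracketValue c = false) :
    pvVal c = 0 := by
  have hn : PySem.Dict.get? pvBracketValue c = none := by
    rw [PySem.Dict.get?_eq_none_iff_contains]
    exact h
  simp [pvVal, PySem.Dict.getD, hn]

-- dropping the filter does not change the sum: filtered-out terms are 0
theorem sum_map_filter_contains (f : Int × Char → Int) (L : List (Int × Char))
    (h : ∀ p ∈ L, PySem.Dict.contains pvBracketValue p.2 = false → f p = 0) :
    ((L.filter (fun p => PySem.Dict.contains pvBracketValue p.2)).map f).sum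
      = (L.map f).sum := by
  induction L with
  | nil => rfl
  | cons a L ih =>
      have ih' := ih (fun p hp hc => h p (List.mem_cons_of_mem a hp) hc)
      cases hc : PySem.Dict.contains pvBracketValue a.2 with
      | true => simp [hc, ih']
      | false => simp [hc, ih', h a (List.mem_cons_self) hc]

-- shifting enumerate's start multiplies the weighted sum by 5^s
theorem sumB_shift (l : List Char) (s : Nat) :
    ((PySem.List.enumerate l (s : Int)).map (fun p => pvVal p.2 * 5 ^ p.1.toNat)).sum
      = 5 ^ s * ((PySem.List.enumerate l).map (fun p => pvVal p.2 * 5 ^ p.1.toNat)).sum := by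
  induction l generalizing s with
  | nil => simp [PySem.List.enumerate_nil]
  | cons c l ih =>
      have h1 : ((s : Int) + 1) = ((s + 1 : Nat) : Int) := by push_cast; ring
      rw [PySem.List.enumerate_cons, PySem.List.enumerate_cons, h1]
      simp only [List.map_cons, List.sum_cons, ih (s + 1)]
      have h0' : (PySem.List.enumerate l (0 + 1 : Int)) = (PySem.List.enumerate l ((0 + 1 : Nat) : Int)) := by norm_num
      rw [h0', ih 1]
      have : ((s : Int)).toNat = s := Int.toNat_natCast s
      rw [this, Int.toNat_zero]
      rw [pow_succ, pow_zero]
      ring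

-- A's Horner loop equals the unfiltered positional sum
theorem score_eq (l : List Char) :
    (l.reverse).foldl pvStepA 0
      = ((PySem.List.enumerate l).map (fun p => pvVal p.2 * 5 ^ p.1.toNat)).sum := by
  induction l with
  | nil => simp [PySem.List.enumerate_nil]
  | cons c l ih =>
      rw [hornerA_cons]
      rw [PySem.List.enumerate_cons]
      simp only [List.map_cons, List.sum_cons]
      have h0 : ((0 : Int) + 1) = ((1 : Nat) : Int) := by norm_num
      rw [h0, sumB_shift l 1, ih]
      rw [Int.toNat_zero, pow_zero, pow_one]
      ring

-- ===== VERDICT (by name: the statement is the Claim_ definition above) =====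
theorem score_incomplete_chars_spec : Claim_equal_score_incomplete_chars := by
  intro chars _
  show _ = _
  simp only [score_incomplete_chars, score_incomplete_chars_alt]
  rw [show (fun p : Int × Char => PySem.Dict.getD pvBracketValue p.2 0 * 5 ^ p.1.toNat)
        = (fun p : Int × Char => pvVal p.2 * 5 ^ p.1.toNat) from rfl]
  rw [sum_map_filter_contains _ _
        (fun p _ hc => by rw [pvVal_of_not_contains p.2 hc, zero_mul])]
  exact score_eq chars.toList
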